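-- pv_equiv track=rewrite | github.com/aaakulchyk/project-euler | Lychrel Numbers.py | add_reversed
-- ===== SOURCE A (Python) =====
-- def get_rank(n):
--     """How many digits a number has in decimal notation."""
--     rank = 0
--     while n:
--         rank += 1
--         n //= 10
--     return rank
--
-- def add_reversed(n):
--     """Add the reversed n to n. E.g. 394 + 493"""
--     result = n
--     rank = get_rank(n)
--     for i in range(1, rank+1):
--         summand = (n % 10) * pow(10, rank-i)
--         result += summand
--         n //= 10
--     return result
-- ===== SOURCE B (Python) =====
-- def add_reversed(n):
--     """Add the reversed n to n. E.g. 394 + 493"""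
--     rev = 0
--     m = n
--     while m:
--         rev = rev * 10 + m % 10
--         m //= 10
--     return n + rev
-- ===== Notes on version B (the rewrite author's own statement) =====
-- stated objective: simpler
-- what changed: Replaced the two-pass scheme (digit-count pass, then a power-weighted placement loop using pow(10, rank-i)) with a single shift-accumulate pass rev = rev*10 + m%10; get_rank and pow disappear.
import Mathlib
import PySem

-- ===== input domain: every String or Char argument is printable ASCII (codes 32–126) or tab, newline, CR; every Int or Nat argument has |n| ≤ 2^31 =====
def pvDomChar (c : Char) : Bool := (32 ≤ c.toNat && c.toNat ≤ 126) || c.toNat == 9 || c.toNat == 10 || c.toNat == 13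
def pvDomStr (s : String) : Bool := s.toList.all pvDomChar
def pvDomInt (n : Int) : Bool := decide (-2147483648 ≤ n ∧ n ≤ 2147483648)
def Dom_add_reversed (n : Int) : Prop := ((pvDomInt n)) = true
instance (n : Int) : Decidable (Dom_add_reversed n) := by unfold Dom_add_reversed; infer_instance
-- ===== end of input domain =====

-- B replaces A's two-pass scheme (digit-count pass + power-weighted placement) with a
-- single shift-accumulate reversal pass; objective: simpler.


-- ===== PORT A =====
-- while loop of get_rank; the guard '0 < n' (rather than 'n ≠ 0') is a totality guard only:
-- on n < 0 the Python loop never terminates, and such n are excluded by Pre_add_reversed.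
def get_rank_loop (n rank : Int) : Int :=
  if h : 0 < n then get_rank_loop (PySem.Int.floordiv n 10) (rank + 1) else rank
termination_by n.toNat
decreasing_by
  have h10 : PySem.Int.floordiv n 10 = n / 10 := PySem.Int.floordiv_eq_ediv_of_pos (by omega)
  have h1 : n / 10 < n := Int.ediv_lt_of_lt_mul (by omega) (by omega)
  have h2 : 0 ≤ n / 10 := Int.ediv_nonneg (le_of_lt h) (by omega)
  omega

def get_rank (n : Int) : Int := get_rank_loop n 0

-- the for-loop of add_reversed, folded over range(1, rank+1) with state (result, n);
-- pow(10, rank-i) has a nonnegative exponent throughout the loop, so '.toNat' is exact there.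
def add_reversed (n : Int) : Int :=
  let rank := get_rank n
  let st := (PySem.List.pyRange 1 (rank + 1) 1).foldl
    (fun (st : Int × Int) (i : Int) =>
      (st.1 + PySem.Int.mod st.2 10 * 10 ^ (rank - i).toNat, PySem.Int.floordiv st.2 10))
    (n, n)
  st.1

-- ===== PORT B =====
-- while loop of B; same totality guard remark as above (Python's B also never returns on n < 0).
def rev_loop (m rev : Int) : Int :=
  if h : 0 < m then rev_loop (PySem.Int.floordiv m 10) (rev * 10 + PySem.Int.mod m 10) else rev
termination_by m.toNat
decreasing_by
  have h10 : PySem.Int.floordiv m 10 = m / 10 := PySem.Int.floordiv_eq_ediv_of_pos (by omega)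
  have h1 : m / 10 < m := Int.ediv_lt_of_lt_mul (by omega) (by omega)
  have h2 : 0 ≤ m / 10 := Int.ediv_nonneg (le_of_lt h) (by omega)
  omega

def add_reversed_alt (n : Int) : Int := n + rev_loop n 0

-- ===== PRECONDITION & SPEC =====
-- Pre_ excludes n < 0: there Python's 'while n' with 'n //= 10' never terminates (n sticks at -1),
-- in both A and B, so neither program returns a value.
def Pre_add_reversed (n : Int) : Prop := 0 ≤ n
instance (n : Int) : Decidable (Pre_add_reversed n) := by unfold Pre_add_reversed; infer_instance
def pvWitness_add_reversed : Int := (394)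

def Spec_add_reversed (n : Int) (out : Int) : Prop := out = add_reversed_alt n
instance (n : Int) (out : Int) : Decidable (Spec_add_reversed n out) := by unfold Spec_add_reversed; infer_instance

-- ===== CLAIM (what is proved, stated in full; the proofs are below) =====
def Claim_equal_add_reversed : Prop := ∀ (n : Int), Dom_add_reversed n → Pre_add_reversed n → Spec_add_reversed n (add_reversed n)

-- ===== LEMMAS AND PROOFS =====

-- reference reversal by digit count, used only in the proofs
def revW : Nat → Int → Int
  | 0, _ => 0
  | k + 1, m => PySem.Int.mod m 10 * 10 ^ k + revW k (PySem.Int.floordiv m 10)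

-- iterated floor division, the second loop component of A
def divIter : Nat → Int → Int
  | 0, m => m
  | k + 1, m => divIter k (PySem.Int.floordiv m 10)

lemma get_rank_loop_shift : ∀ (k : Nat) (m r : Int), m.toNat = k →
    get_rank_loop m r = r + get_rank_loop m 0 := by
  intro k
  induction k using Nat.strong_induction_on with
  | _ k IH =>
    intro m r hk
    conv_lhs => rw [get_rank_loop]
    conv_rhs => rw [get_rank_loop]
    by_cases h : 0 < m
    · rw [dif_pos h, dif_pos h]
      have hlt : (PySem.Int.floordiv m 10).toNat < k := by
        have h10 : PySem.Int.floordiv m 10 = m / 10 := PySem.Int.floordiv_eq_ediv_of_pos (by omega)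
        have h1 : m / 10 < m := Int.ediv_lt_of_lt_mul (by omega) (by omega)
        have h2 : 0 ≤ m / 10 := Int.ediv_nonneg (le_of_lt h) (by omega)
        omega
      rw [IH _ hlt _ _ rfl, IH _ hlt _ (0 + 1) rfl]
      ring
    · rw [dif_neg h, dif_neg h]; ring

lemma get_rank_nonneg : ∀ (k : Nat) (m : Int), m.toNat = k → 0 ≤ get_rank m := by
  intro k
  induction k using Nat.strong_induction_on with
  | _ k IH =>
    intro m hk
    unfold get_rank
    rw [get_rank_loop]
    by_cases h : 0 < m
    · rw [dif_pos h]
      have hlt : (PySem.Int.floordiv m 10).toNat < k := by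
        have h10 : PySem.Int.floordiv m 10 = m / 10 := PySem.Int.floordiv_eq_ediv_of_pos (by omega)
        have h1 : m / 10 < m := Int.ediv_lt_of_lt_mul (by omega) (by omega)
        have h2 : 0 ≤ m / 10 := Int.ediv_nonneg (le_of_lt h) (by omega)
        omega
      rw [get_rank_loop_shift (PySem.Int.floordiv m 10).toNat _ _ rfl]
      have := IH _ hlt (PySem.Int.floordiv m 10) rfl
      unfold get_rank at this
      omega
    · rw [dif_neg h]

lemma get_rank_pos_step {m : Int} (h : 0 < m) :
    get_rank m = get_rank (PySem.Int.floordiv m 10) + 1 := by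
  unfold get_rank
  rw [get_rank_loop, dif_pos h, get_rank_loop_shift (PySem.Int.floordiv m 10).toNat _ _ rfl]
  ring

lemma foldA (k : Nat) : ∀ (d res m : Int),
    (PySem.List.pyRange (d + 1 - (k : Int)) (d + 1) 1).foldl
      (fun (st : Int × Int) (i : Int) =>
        (st.1 + PySem.Int.mod st.2 10 * 10 ^ (d - i).toNat, PySem.Int.floordiv st.2 10))
      (res, m) = (res + revW k m, divIter k m) := by
  induction k with
  | zero =>
    intro d res m
    simp [revW, divIter]
  | succ k IH =>
    intro d res m
    have hcons := PySem.List.pyRange_one_cons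
      (a := d + 1 - ((k : Int) + 1)) (b := d + 1) (by omega)
    have hcast : ((k + 1 : Nat) : Int) = (k : Int) + 1 := by push_cast; ring
    rw [hcast, hcons, List.foldl_cons]
    have harg : d + 1 - ((k : Int) + 1) + 1 = d + 1 - (k : Int) := by omega
    have hexp : (d - (d + 1 - ((k : Int) + 1))).toNat = k := by omega
    rw [harg, hexp, IH]
    simp only [revW, divIter]
    rw [add_assoc]

lemma rev_loop_eq : ∀ (j : Nat) (m : Int), m.toNat = j → 0 ≤ m →
    ∀ rev : Int, rev_loop m rev = rev * 10 ^ (get_rank m).toNat + revW (get_rank m).toNat m := by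
  intro j
  induction j using Nat.strong_induction_on with
  | _ j IH =>
    intro m hj hm rev
    rw [rev_loop]
    by_cases h : 0 < m
    · rw [dif_pos h]
      have h10 : PySem.Int.floordiv m 10 = m / 10 := PySem.Int.floordiv_eq_ediv_of_pos (by omega)
      have h1 : m / 10 < m := Int.ediv_lt_of_lt_mul (by omega) (by omega)
      have h2 : 0 ≤ m / 10 := Int.ediv_nonneg (le_of_lt h) (by omega)
      have hlt : (PySem.Int.floordiv m 10).toNat < j := by omega
      have hnn : 0 ≤ PySem.Int.floordiv m 10 := by omega
      rw [IH _ hlt _ rfl hnn]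
      have hstep := get_rank_pos_step h
      have hnn' := get_rank_nonneg (PySem.Int.floordiv m 10).toNat (PySem.Int.floordiv m 10) rfl
      have htn : (get_rank m).toNat = (get_rank (PySem.Int.floordiv m 10)).toNat + 1 := by omega
      rw [htn]
      simp only [revW]
      ring
    · rw [dif_neg h]
      have hm0 : m = 0 := by omega
      subst hm0
      have : get_rank 0 = 0 := by unfold get_rank; rw [get_rank_loop]; simp
      rw [this]
      simp [revW]

-- ===== VERDICT (by name: the statement is the Claim_ definition above) =====
theorem add_reversed_spec : Claim_equal_add_reversed := by
  intro n _ hpre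
  unfold Spec_add_reversed add_reversed add_reversed_alt
  have hnn : 0 ≤ get_rank n := get_rank_nonneg n.toNat n rfl
  have hr : ((get_rank n).toNat : Int) = get_rank n := Int.toNat_of_nonneg hnn
  have harg : get_rank n + 1 - ((get_rank n).toNat : Int) = 1 := by omega
  have hA := foldA (get_rank n).toNat (get_rank n) n n
  rw [harg] at hA
  simp only [hA]
  rw [rev_loop_eq n.toNat n rfl hpre 0]
  ring
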